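-- pv_equiv track=rewrite | github.com/Bambaleylo21/rpl-predictions-bot | app/stats.py | _format_rate_metric
-- ===== SOURCE A (Python) =====
-- def _format_rate_metric(
--     names: dict[int, str],
--     rows: list[tuple[int, int, int, int]],  # (tg_user_id, hits, total, pct)
--     pick_max: bool,
-- ) -> str:
--     if not rows:
--         return "нет данных"
--     target = max(r[3] for r in rows) if pick_max else min(r[3] for r in rows)
--     picked = [r for r in rows if r[3] == target]
--     picked.sort(key=lambda r: names.get(r[0], str(r[0])).lower())
--     return ", ".join(f"{names.get(uid, str(uid))} — {pct}% ({hits}/{total})" for uid, hits, total, pct in picked)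
-- ===== SOURCE B (Python) =====
-- def _format_rate_metric(
--     names: dict[int, str],
--     rows: list[tuple[int, int, int, int]],  # (tg_user_id, hits, total, pct)
--     pick_max: bool,
-- ) -> str:
--     if not rows:
--         return "нет данных"
--     best = None
--     picked = []
--     for r in rows:
--         pct = r[3]
--         if best is None or (pct > best if pick_max else pct < best):
--             best = pct
--             picked = [r]
--         elif pct == best:
--             picked.append(r)
--     picked.sort(key=lambda r: names.get(r[0], str(r[0])).lower())
--     return ", ".join(f"{names.get(uid, str(uid))} — {pct}% ({hits}/{total})" for uid, hits, total, pct in picked)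
-- ===== Notes on version B (the rewrite author's own statement) =====
-- stated objective: alternative
-- what changed: Replaces the separate max()/min() pass plus filter pass with a single fused traversal maintaining the running best pct and the list of rows achieving it (reset on a strictly better pct, append on a tie); the sort-and-format tail is unchanged.
import Mathlib
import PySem

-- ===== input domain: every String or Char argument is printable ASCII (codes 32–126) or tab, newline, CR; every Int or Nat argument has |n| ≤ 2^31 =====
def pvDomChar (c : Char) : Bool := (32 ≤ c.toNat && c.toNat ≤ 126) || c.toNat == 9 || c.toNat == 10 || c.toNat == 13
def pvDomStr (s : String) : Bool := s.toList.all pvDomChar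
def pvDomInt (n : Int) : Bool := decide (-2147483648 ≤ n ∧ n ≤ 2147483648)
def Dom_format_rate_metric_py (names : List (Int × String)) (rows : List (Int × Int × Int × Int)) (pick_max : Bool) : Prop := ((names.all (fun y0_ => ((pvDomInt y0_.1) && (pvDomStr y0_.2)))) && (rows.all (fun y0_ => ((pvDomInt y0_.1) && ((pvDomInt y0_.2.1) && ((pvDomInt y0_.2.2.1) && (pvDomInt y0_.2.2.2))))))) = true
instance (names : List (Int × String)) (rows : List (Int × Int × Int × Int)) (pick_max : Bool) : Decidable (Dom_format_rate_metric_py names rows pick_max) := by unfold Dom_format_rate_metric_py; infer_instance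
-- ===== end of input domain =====

-- B fuses A's separate max()/min() pass and filter pass into one traversal keeping the
-- running best pct and the rows achieving it; the sort-and-format tail is shared code.

-- shared helpers (identical code in both Pythons): names.get(uid, str(uid)), the
-- lower-cased sort key, and the f-string for one row
def pvName (names : List (Int × String)) (uid : Int) : String :=
  match names.find? (fun p => p.1 == uid) with
  | some p => p.2
  | none => PySem.Int.toStr uid

def pvKey (names : List (Int × String)) (r : Int × Int × Int × Int) : String :=
  PySem.Str.lower (pvName names r.1)

def pvFmt (names : List (Int × String)) (r : Int × Int × Int × Int) : String :=
  pvName names r.1 ++ " — " ++ PySem.Int.toStr r.2.2.2 ++ "% (" ++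
    PySem.Int.toStr r.2.1 ++ "/" ++ PySem.Int.toStr r.2.2.1 ++ ")"

-- ===== PORT A =====
def format_rate_metric_py (names : List (Int × String)) (rows : List (Int × Int × Int × Int)) (pick_max : Bool) : String :=
  if rows = [] then "нет данных"
  else
    let pcts := rows.map (fun r => r.2.2.2)
    let target : Int :=
      if pick_max then (PySem.List.max? pcts (fun x => x)).getD 0
      else (PySem.List.min? pcts (fun x => x)).getD 0
    let picked := rows.filter (fun r => r.2.2.2 == target)
    PySem.Str.join ", " ((PySem.List.sorted picked (pvKey names) false).map (pvFmt names))

-- ===== PORT B =====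
-- one step of B's fused loop: reset on a strictly better pct, append on a tie
def pvStep (pick_max : Bool) (st : Option Int × List (Int × Int × Int × Int))
    (r : Int × Int × Int × Int) : Option Int × List (Int × Int × Int × Int) :=
  let pct := r.2.2.2
  match st.1 with
  | none => (some pct, [r])
  | some best =>
    if (if pick_max then best < pct else pct < best) then (some pct, [r])
    else if pct == best then (some best, st.2 ++ [r])
    else st

def format_rate_metric_py_alt (names : List (Int × String)) (rows : List (Int × Int × Int × Int)) (pick_max : Bool) : String :=
  if rows = [] then "нет данных"
  else
    let picked := (rows.foldl (pvStep pick_max) (none, [])).2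
    PySem.Str.join ", " ((PySem.List.sorted picked (pvKey names) false).map (pvFmt names))

-- ===== PRECONDITION & SPEC =====
def Spec_format_rate_metric_py (names : List (Int × String)) (rows : List (Int × Int × Int × Int)) (pick_max : Bool) (out : String) : Prop := out = format_rate_metric_py_alt names rows pick_max
instance (names : List (Int × String)) (rows : List (Int × Int × Int × Int)) (pick_max : Bool) (out : String) : Decidable (Spec_format_rate_metric_py names rows pick_max out) := by unfold Spec_format_rate_metric_py; infer_instance

-- ===== CLAIM (what is proved, stated in full; the proofs are below) =====
def Claim_equal_format_rate_metric_py : Prop := ∀ (names : List (Int × String)) (rows : List (Int × Int × Int × Int)) (pick_max : Bool), Dom_format_rate_metric_py names rows pick_max → Spec_format_rate_metric_py names rows pick_max (format_rate_metric_py names rows pick_max)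

-- ===== LEMMAS AND PROOFS =====

-- generic form of B's loop over an arbitrary strict comparison (instantiated at < and >)
def pvLt (pick_max : Bool) (a b : Int) : Bool := if pick_max then a < b else b < a

def pvBestL (lt : Int → Int → Bool) (rs : List (Int × Int × Int × Int)) (b : Int) : Int :=
  rs.foldl (fun a r => if lt a r.2.2.2 then r.2.2.2 else a) b

def genStep (lt : Int → Int → Bool) (st : Option Int × List (Int × Int × Int × Int))
    (r : Int × Int × Int × Int) : Option Int × List (Int × Int × Int × Int) :=
  match st.1 with
  | none => (some r.2.2.2, [r])
  | some best =>
    if lt best r.2.2.2 then (some r.2.2.2, [r])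
    else if r.2.2.2 == best then (some best, st.2 ++ [r])
    else st

lemma step_eq (pick_max : Bool) : pvStep pick_max = genStep (pvLt pick_max) := by
  funext st r
  obtain ⟨ob, acc⟩ := st
  cases ob <;> cases pick_max <;> simp [pvStep, genStep, pvLt]

lemma bestL_reach (lt : Int → Int → Bool)
    (htrans : ∀ a b c, lt a b = true → lt b c = true → lt a c = true) :
    ∀ (rs : List (Int × Int × Int × Int)) (b : Int),
      pvBestL lt rs b = b ∨ lt b (pvBestL lt rs b) = true := by
  intro rs
  induction rs with
  | nil => intro b; left; rfl
  | cons r rs ih =>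
    intro b
    by_cases hl : lt b r.2.2.2 = true
    · have h := ih r.2.2.2
      have hB : pvBestL lt (r :: rs) b = pvBestL lt rs r.2.2.2 := by
        simp [pvBestL, hl]
      rw [hB]
      rcases h with h | h
      · right; rw [h]; exact hl
      · right; exact htrans _ _ _ hl h
    · have hB : pvBestL lt (r :: rs) b = pvBestL lt rs b := by
        simp [pvBestL, hl]
      rw [hB]; exact ih b

lemma genLoop (lt : Int → Int → Bool)
    (hasym : ∀ a b, lt a b = true → lt b a ≠ true)
    (htrans : ∀ a b c, lt a b = true → lt b c = true → lt a c = true) :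
    ∀ (rs : List (Int × Int × Int × Int)) (b : Int) (acc : List (Int × Int × Int × Int)),
      rs.foldl (genStep lt) (some b, acc) =
        (some (pvBestL lt rs b),
         (if b = pvBestL lt rs b then acc else []) ++
           rs.filter (fun r => r.2.2.2 == pvBestL lt rs b)) := by
  intro rs
  induction rs with
  | nil => intro b acc; simp [pvBestL]
  | cons r rs ih =>
    intro b acc
    by_cases hl : lt b r.2.2.2 = true
    · have hB : pvBestL lt (r :: rs) b = pvBestL lt rs r.2.2.2 := by
        simp [pvBestL, hl]
      have hstep : genStep lt (some b, acc) r = (some r.2.2.2, [r]) := by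
        simp [genStep, hl]
      rw [List.foldl_cons, hstep, ih, hB]
      have hne : b ≠ pvBestL lt rs r.2.2.2 := by
        rcases bestL_reach lt htrans rs r.2.2.2 with h | h
        · intro he; rw [he, h] at hl; exact hasym _ _ hl hl
        · intro he; rw [← he] at h; exact hasym _ _ hl h
      rw [if_neg hne, List.filter_cons, List.nil_append]
      by_cases h2 : r.2.2.2 = pvBestL lt rs r.2.2.2
      · rw [if_pos h2, if_pos (show (r.2.2.2 == pvBestL lt rs r.2.2.2) = true from beq_iff_eq.mpr h2), List.singleton_append]
      · rw [if_neg h2, if_neg (show ¬ (r.2.2.2 == pvBestL lt rs r.2.2.2) = true by simpa using h2), List.nil_append]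
    · by_cases he : r.2.2.2 = b
      · have hstep : genStep lt (some b, acc) r = (some b, acc ++ [r]) := by
          have hbeq : (r.2.2.2 == b) = true := beq_iff_eq.mpr he
          simp [genStep, hl, hbeq]
        have hB : pvBestL lt (r :: rs) b = pvBestL lt rs b := by
          simp [pvBestL, hl]
        rw [List.foldl_cons, hstep, ih, hB, List.filter_cons]
        by_cases h3 : b = pvBestL lt rs b
        · rw [if_pos h3, if_pos h3,
            if_pos (show (r.2.2.2 == pvBestL lt rs b) = true from beq_iff_eq.mpr (he.trans h3)),
            List.append_assoc, List.singleton_append]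
        · have hne3 : ¬ r.2.2.2 = pvBestL lt rs b := by rw [he]; exact h3
          rw [if_neg h3, if_neg h3,
            if_neg (show ¬ (r.2.2.2 == pvBestL lt rs b) = true by simpa using hne3)]
      · have hstep : genStep lt (some b, acc) r = (some b, acc) := by
          simp [genStep, hl, he]
        have hB : pvBestL lt (r :: rs) b = pvBestL lt rs b := by
          simp [pvBestL, hl]
        rw [List.foldl_cons, hstep, ih, hB, List.filter_cons]
        have hne2 : ¬ r.2.2.2 = pvBestL lt rs b := by
          rcases bestL_reach lt htrans rs b with h | h
          · rw [h]; exact he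
          · intro h2; rw [← h2] at h; exact hl h
        rw [if_neg (show ¬ (r.2.2.2 == pvBestL lt rs b) = true by simpa using hne2)]

lemma pvLt_asym (pick_max : Bool) : ∀ a b, pvLt pick_max a b = true → pvLt pick_max b a ≠ true := by
  intro a b; cases pick_max <;> simp [pvLt] <;> omega

lemma pvLt_trans (pick_max : Bool) :
    ∀ a b c, pvLt pick_max a b = true → pvLt pick_max b c = true → pvLt pick_max a c = true := by
  intro a b c; cases pick_max <;> simp [pvLt] <;> omega

-- A's target (max()/min() over the mapped pcts) equals the running best of B's loop
lemma pvTarget (pick_max : Bool) (r : Int × Int × Int × Int)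
    (rs : List (Int × Int × Int × Int)) :
    (if pick_max then
       (PySem.List.max? ((r :: rs).map (fun r => r.2.2.2)) (fun x => x)).getD 0
     else (PySem.List.min? ((r :: rs).map (fun r => r.2.2.2)) (fun x => x)).getD 0)
      = pvBestL (pvLt pick_max) rs r.2.2.2 := by
  cases pick_max
  · rw [if_neg (by simp), List.map_cons, PySem.List.min?_id_cons, Option.getD_some,
      List.foldl_map]
    have hf : (fun (x : Int) (y : Int × Int × Int × Int) => min x y.2.2.2) =
        (fun a r => if pvLt false a r.2.2.2 then r.2.2.2 else a) := by
      funext a y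
      have : pvLt false a y.2.2.2 = decide (y.2.2.2 < a) := rfl
      rw [this, min_def]; split_ifs <;> simp_all <;> omega
    rw [pvBestL, ← hf]
  · rw [if_pos rfl, List.map_cons, PySem.List.max?_id_cons, Option.getD_some,
      List.foldl_map]
    have hf : (fun (x : Int) (y : Int × Int × Int × Int) => max x y.2.2.2) =
        (fun a r => if pvLt true a r.2.2.2 then r.2.2.2 else a) := by
      funext a y
      have : pvLt true a y.2.2.2 = decide (a < y.2.2.2) := rfl
      rw [this, max_def]; split_ifs <;> simp_all <;> omega
    rw [pvBestL, ← hf]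

-- ===== VERDICT (by name: the statement is the Claim_ definition above) =====
theorem format_rate_metric_py_spec : Claim_equal_format_rate_metric_py := by
  intro names rows pick_max _
  show format_rate_metric_py names rows pick_max = format_rate_metric_py_alt names rows pick_max
  cases rows with
  | nil => rfl
  | cons r rs =>
    unfold format_rate_metric_py format_rate_metric_py_alt
    simp only [if_neg (List.cons_ne_nil r rs)]
    rw [List.foldl_cons, step_eq]
    have hstep : genStep (pvLt pick_max) (none, []) r = (some r.2.2.2, [r]) := by
      simp [genStep]
    rw [hstep, genLoop (pvLt pick_max) (pvLt_asym pick_max) (pvLt_trans pick_max),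
      pvTarget pick_max r rs, List.filter_cons]
    by_cases h : r.2.2.2 = pvBestL (pvLt pick_max) rs r.2.2.2
    · rw [if_pos h,
        if_pos (show (r.2.2.2 == pvBestL (pvLt pick_max) rs r.2.2.2) = true from beq_iff_eq.mpr h),
        List.singleton_append]
    · rw [if_neg h,
        if_neg (show ¬ (r.2.2.2 == pvBestL (pvLt pick_max) rs r.2.2.2) = true by simpa using h),
        List.nil_append]
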